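-- pv_equiv track=rewrite | github.com/elixpo/tommy.elixpo | src/services/code_agent/file_editor.py | _get_matching_indent
-- ===== SOURCE A (Python) =====
-- from typing import Optional
--
-- def _get_matching_indent(chunk: list[str], normalized: list[str]) -> Optional[str]:
--     """
--     Check if chunk matches normalized lines (ignoring leading whitespace).
--     Returns the common indent if match, None otherwise.
--     """
--     if len(chunk) != len(normalized):
--         return None
--
--     indent = None
--     for c_line, n_line in zip(chunk, normalized):
--         c_stripped = c_line.lstrip()
--         n_stripped = n_line.lstrip()
--
--         # Both empty is fine
--         if not c_stripped and not n_stripped: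
--             continue
--
--         # Content must match after stripping
--         if c_stripped != n_stripped:
--             return None
--
--         # Track indent from first non-empty line
--         if indent is None and c_stripped:
--             c_indent = len(c_line) - len(c_stripped)
--             n_indent = len(n_line) - len(n_stripped)
--             indent = c_line[:c_indent - n_indent] if c_indent >= n_indent else ""
--
--     return indent if indent is not None else ""
-- ===== SOURCE B (Python) =====
-- def _get_matching_indent(chunk, normalized):
--     if len(chunk) != len(normalized):
--         return None
--     pairs = list(zip(chunk, normalized))
--     # phase 1: every line must match after stripping leading whitespace
--     if not all(c.lstrip() == n.lstrip() for c, n in pairs):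
--         return None
--     # phase 2: the indent comes from the first non-empty line only
--     for c, n in pairs:
--         cs = c.lstrip()
--         if cs:
--             ns = n.lstrip()
--             ci = len(c) - len(cs)
--             ni = len(n) - len(ns)
--             return c[:ci - ni] if ci >= ni else ""
--     return ""
-- ===== Notes on version B (the rewrite author's own statement) =====
-- stated objective: simpler
-- what changed: Replaces A's single loop with Optional-indent state and mid-loop early returns by two independent phases: an all() validation pass over the zipped lines, then a separate scan that returns the indent computed from the first non-empty line.
import Mathlib
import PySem

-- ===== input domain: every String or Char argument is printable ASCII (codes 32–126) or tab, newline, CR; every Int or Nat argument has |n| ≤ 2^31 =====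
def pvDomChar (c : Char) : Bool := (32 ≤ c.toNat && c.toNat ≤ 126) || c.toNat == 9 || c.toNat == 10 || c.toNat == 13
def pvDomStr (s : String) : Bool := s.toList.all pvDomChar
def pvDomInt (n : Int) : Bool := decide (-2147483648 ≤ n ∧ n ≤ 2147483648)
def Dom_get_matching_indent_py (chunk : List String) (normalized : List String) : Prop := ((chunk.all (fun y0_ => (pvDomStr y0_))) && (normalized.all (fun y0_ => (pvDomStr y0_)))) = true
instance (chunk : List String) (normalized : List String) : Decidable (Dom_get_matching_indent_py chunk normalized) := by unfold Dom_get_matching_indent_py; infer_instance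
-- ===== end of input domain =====

-- B replaces A's stateful single loop (Optional indent, early returns) by two separate
-- phases: validate all lines, then take the indent from the first non-empty line.

-- ===== PORT A =====
-- loop over zip(chunk, normalized), carrying the Optional `indent`; `none` result = early `return None`
def pvLoopA : List (String × String) → Option String → Option String
  | [], indent => some (indent.getD "")
  | (c_line, n_line) :: rest, indent =>
    let c_stripped := PySem.Str.lstrip c_line
    let n_stripped := PySem.Str.lstrip n_line
    if c_stripped = "" ∧ n_stripped = "" then
      pvLoopA rest indent
    else if c_stripped ≠ n_stripped then
      none
    else if indent = none ∧ c_stripped ≠ "" then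
      let c_indent : Int := (PySem.Str.len c_line : Int) - (PySem.Str.len c_stripped : Int)
      let n_indent : Int := (PySem.Str.len n_line : Int) - (PySem.Str.len n_stripped : Int)
      pvLoopA rest (some (if c_indent ≥ n_indent then PySem.Str.slice c_line none (some (c_indent - n_indent)) else ""))
    else
      pvLoopA rest indent

def get_matching_indent_py (chunk : List String) (normalized : List String) : Option String :=
  if chunk.length ≠ normalized.length then none
  else pvLoopA (chunk.zip normalized) none

-- ===== PORT B =====
-- phase 2 of B: the indent from the first non-empty line ("" if all lines are empty)
def pvFirstIndent : List (String × String) → String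
  | [] => ""
  | (c, n) :: rest =>
    let cs := PySem.Str.lstrip c
    if cs ≠ "" then
      let ns := PySem.Str.lstrip n
      let ci : Int := (PySem.Str.len c : Int) - (PySem.Str.len cs : Int)
      let ni : Int := (PySem.Str.len n : Int) - (PySem.Str.len ns : Int)
      if ci ≥ ni then PySem.Str.slice c none (some (ci - ni)) else ""
    else
      pvFirstIndent rest

def get_matching_indent_py_alt (chunk : List String) (normalized : List String) : Option String :=
  if chunk.length ≠ normalized.length then none
  else
    let pairs := chunk.zip normalized
    if pairs.all (fun p => PySem.Str.lstrip p.1 == PySem.Str.lstrip p.2) then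
      some (pvFirstIndent pairs)
    else
      none

-- ===== PRECONDITION & SPEC =====
def Spec_get_matching_indent_py (chunk : List String) (normalized : List String) (out : Option String) : Prop := out = get_matching_indent_py_alt chunk normalized
instance (chunk : List String) (normalized : List String) (out : Option String) : Decidable (Spec_get_matching_indent_py chunk normalized out) := by unfold Spec_get_matching_indent_py; infer_instance

-- ===== CLAIM (what is proved, stated in full; the proofs are below) =====
def Claim_equal_get_matching_indent_py : Prop := ∀ (chunk : List String) (normalized : List String), Dom_get_matching_indent_py chunk normalized → Spec_get_matching_indent_py chunk normalized (get_matching_indent_py chunk normalized)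

-- ===== LEMMAS AND PROOFS =====
-- loop invariant: A's loop equals B's validate-then-scan, for any carried indent state
lemma pvLoopA_eq (pairs : List (String × String)) :
    ∀ ind : Option String,
      pvLoopA pairs ind =
        if pairs.all (fun p => PySem.Str.lstrip p.1 == PySem.Str.lstrip p.2) then
          some (ind.getD (pvFirstIndent pairs))
        else none := by
  induction pairs with
  | nil => intro ind; simp [pvLoopA, pvFirstIndent]
  | cons hd tl ih =>
    intro ind
    obtain ⟨c, n⟩ := hd
    simp only [pvLoopA, pvFirstIndent, List.all_cons]
    by_cases hboth : PySem.Str.lstrip c = "" ∧ PySem.Str.lstrip n = ""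
    · rw [if_pos hboth]
      rw [ih ind]
      have hb : (PySem.Str.lstrip c == PySem.Str.lstrip n) = true := by
        simp [hboth.1, hboth.2]
      rw [hb, Bool.true_and]
      simp [hboth.1]
    · rw [if_neg hboth]
      by_cases hne : PySem.Str.lstrip c ≠ PySem.Str.lstrip n
      · rw [if_pos hne]
        have : (PySem.Str.lstrip c == PySem.Str.lstrip n) = false := by
          simp [hne]
        simp [this]
      · rw [if_neg hne]
        push Not at hne
        have hcs : PySem.Str.lstrip c ≠ "" := by
          intro h; exact hboth ⟨h, hne ▸ h⟩
        have hbeq : (PySem.Str.lstrip c == PySem.Str.lstrip n) = true := by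
          simp [hne]
        cases ind with
        | none =>
          rw [if_pos ⟨rfl, hcs⟩]
          rw [ih]
          rw [hbeq, Bool.true_and]
          simp [hcs]
        | some s =>
          rw [if_neg (by simp)]
          rw [ih]
          rw [hbeq, Bool.true_and]
          simp

-- ===== VERDICT (by name: the statement is the Claim_ definition above) =====
theorem get_matching_indent_py_spec : Claim_equal_get_matching_indent_py := by
  intro chunk normalized _
  unfold Spec_get_matching_indent_py get_matching_indent_py get_matching_indent_py_alt
  by_cases hl : chunk.length ≠ normalized.length
  · rw [if_pos hl, if_pos hl]
  · rw [if_neg hl, if_neg hl]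
    rw [pvLoopA_eq]
    simp
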